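-- pv_equiv track=rewrite | github.com/romanschade/STORM | model/visualizer.py | generate_time_labels
-- ===== SOURCE A (Python) =====
-- def generate_time_labels(timesteps: int) -> list[str]:
--     """Generate x-axis labels formatted as 'Day x - HH:MM'"""
--
--     # Initialize
--     labels = []
--
--     # Compute labels
--     for i in range(timesteps):
--         total_minutes = i * 15
--         day = total_minutes // (24 * 60) + 1
--         hour = (total_minutes % (24 * 60)) // 60
--         minute = (total_minutes % 60)
--         labels.append(f'Day {day} - {hour:02}:{minute:02}')
--     return labels
-- ===== SOURCE B (Python) =====
-- def generate_time_labels(timesteps: int) -> list[str]: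
--     """Generate x-axis labels formatted as 'Day x - HH:MM'"""
--     labels = []
--     day, hour, minute = 1, 0, 0
--     for _ in range(timesteps):
--         labels.append(f'Day {day} - {hour:02}:{minute:02}')
--         minute += 15
--         if minute == 60:
--             minute = 0
--             hour += 1
--             if hour == 24:
--                 hour = 0
--                 day += 1
--     return labels
-- ===== Notes on version B (the rewrite author's own statement) =====
-- stated objective: alternative
-- what changed: B threads a running clock (day, hour, minute) as loop state, advancing it by one quarter-hour step with carry propagation, instead of recomputing day/hour/minute from the step index by floor-division and modulo on every iteration.
import Mathlib
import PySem

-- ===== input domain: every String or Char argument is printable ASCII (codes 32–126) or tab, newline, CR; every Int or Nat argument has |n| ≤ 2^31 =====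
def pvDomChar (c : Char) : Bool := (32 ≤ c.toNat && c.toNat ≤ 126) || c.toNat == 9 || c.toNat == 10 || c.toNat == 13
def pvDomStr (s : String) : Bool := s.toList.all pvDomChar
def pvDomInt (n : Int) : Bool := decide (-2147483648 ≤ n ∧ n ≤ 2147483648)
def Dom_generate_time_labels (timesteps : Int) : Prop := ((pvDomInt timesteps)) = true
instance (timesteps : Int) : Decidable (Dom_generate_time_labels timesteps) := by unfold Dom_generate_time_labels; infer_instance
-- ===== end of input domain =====

-- B replaces the per-iteration floor-division/modulo arithmetic of A by a running
-- clock (day, hour, minute) carried through the loop ('alternative'; same O(n) cost).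

-- shared formatting helper: f'Day {day} - {hour:02}:{minute:02}' (both Pythons contain this same f-string)
def pvPad2 (n : Int) : String :=
  let s := PySem.Int.toStr n
  if PySem.Str.len s < 2 then "0" ++ s else s

def pvLabel (day hour minute : Int) : String :=
  "Day " ++ PySem.Int.toStr day ++ " - " ++ pvPad2 hour ++ ":" ++ pvPad2 minute

-- ===== PORT A =====
def generate_time_labels (timesteps : Int) : List String :=
  (PySem.List.pyRange 0 timesteps 1).foldl
    (fun labels i =>
      let total_minutes := i * 15
      let day := PySem.Int.floordiv total_minutes (24 * 60) + 1
      let hour := PySem.Int.floordiv (PySem.Int.mod total_minutes (24 * 60)) 60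
      let minute := PySem.Int.mod total_minutes 60
      labels ++ [pvLabel day hour minute])
    []

-- ===== PORT B =====
-- one loop iteration of B: append the current label, then advance the clock one step with carries
def pvStepB (st : List String × Int × Int × Int) (_i : Int) : List String × Int × Int × Int :=
  match st with
  | (labels, day, hour, minute) =>
    let labels := labels ++ [pvLabel day hour minute]
    let minute := minute + 15
    if minute = 60 then
      let hour := hour + 1
      if hour = 24 then (labels, day + 1, 0, 0)
      else (labels, day, hour, 0)
    else (labels, day, hour, minute)

def generate_time_labels_alt (timesteps : Int) : List String :=
  ((PySem.List.pyRange 0 timesteps 1).foldl pvStepB ([], 1, 0, 0)).1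

-- ===== PRECONDITION & SPEC =====
def Spec_generate_time_labels (timesteps : Int) (out : List String) : Prop := out = generate_time_labels_alt timesteps
instance (timesteps : Int) (out : List String) : Decidable (Spec_generate_time_labels timesteps out) := by unfold Spec_generate_time_labels; infer_instance

-- ===== CLAIM (what is proved, stated in full; the proofs are below) =====
def Claim_equal_generate_time_labels : Prop := ∀ (timesteps : Int), Dom_generate_time_labels timesteps → Spec_generate_time_labels timesteps (generate_time_labels timesteps)

-- ===== LEMMAS AND PROOFS =====

-- one more step of A appends one label computed from i = n
lemma A_succ (n : Int) (hn : 0 ≤ n) :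
    generate_time_labels (n + 1)
      = generate_time_labels n
        ++ [pvLabel (PySem.Int.floordiv (n * 15) (24 * 60) + 1)
                    (PySem.Int.floordiv (PySem.Int.mod (n * 15) (24 * 60)) 60)
                    (PySem.Int.mod (n * 15) 60)] := by
  unfold generate_time_labels
  rw [PySem.List.pyRange_one_succ_right hn, List.foldl_append]
  rfl

-- invariant of B's loop: after n iterations the labels equal A's and the clock
-- equals A's closed-form day/hour/minute at step n
lemma key (n : Nat) :
    (PySem.List.pyRange 0 (n : Int) 1).foldl pvStepB ([], 1, 0, 0)
      = (generate_time_labels (n : Int),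
         (n : Int) * 15 / 1440 + 1,
         ((n : Int) * 15 % 1440) / 60,
         (n : Int) * 15 % 60) := by
  induction n with
  | zero =>
    simp [PySem.List.pyRange_one_eq_nil, generate_time_labels]
  | succ n ih =>
    have hcast : (((n + 1 : Nat)) : Int) = (n : Int) + 1 := by push_cast; ring
    rw [hcast, PySem.List.pyRange_one_succ_right (by positivity), List.foldl_append, ih,
        A_succ (n : Int) (by positivity)]
    have hd : PySem.Int.floordiv ((n : Int) * 15) (24 * 60) = (n : Int) * 15 / 1440 := by
      rw [PySem.Int.floordiv_eq_ediv_of_pos (by norm_num)]; norm_num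
    have hm : PySem.Int.mod ((n : Int) * 15) (24 * 60) = (n : Int) * 15 % 1440 := by
      rw [PySem.Int.mod_eq_emod_of_pos (by norm_num)]; norm_num
    have hh : PySem.Int.floordiv ((n : Int) * 15 % 1440) 60 = ((n : Int) * 15 % 1440) / 60 := by
      rw [PySem.Int.floordiv_eq_ediv_of_pos (by norm_num)]
    have hm2 : PySem.Int.mod ((n : Int) * 15) 60 = (n : Int) * 15 % 60 := by
      rw [PySem.Int.mod_eq_emod_of_pos (by norm_num)]
    simp only [List.foldl_cons, List.foldl_nil, pvStepB, hd, hm, hh, hm2]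
    split_ifs with h1 h2
    · -- minute rolls over and hour rolls over
      simp only [Prod.mk.injEq]
      exact ⟨trivial, by omega, by omega, by omega⟩
    · -- minute rolls over, hour does not
      simp only [Prod.mk.injEq]
      exact ⟨trivial, by omega, by omega, by omega⟩
    · -- no carry
      simp only [Prod.mk.injEq]
      exact ⟨trivial, by omega, by omega, by omega⟩

-- ===== VERDICT (by name: the statement is the Claim_ definition above) =====
theorem generate_time_labels_spec : Claim_equal_generate_time_labels := by
  intro t _
  unfold Spec_generate_time_labels generate_time_labels_alt
  by_cases ht : 0 ≤ t
  · obtain ⟨n, rfl⟩ := Int.eq_ofNat_of_zero_le ht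
    rw [key n]
  · rw [PySem.List.pyRange_one_eq_nil (by omega)]
    simp [generate_time_labels, PySem.List.pyRange_one_eq_nil (show t ≤ 0 by omega)]
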